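-- pv_equiv track=rewrite | github.com/costadanilofreitas/pos-structure | src/_comps/topic-client/lib/messageprocessor/_MessageProcessorMessageHandler.py | _get_path_variables_names
-- ===== SOURCE A (Python) =====
-- def _get_path_variables_names(api_path):
--     # type: (unicode) -> List[unicode]
--     ret = []
--
--     index2 = 0
--     while True:
--         try:
--             index1 = api_path.index("{", index2)
--         except ValueError:
--             return ret
--         try:
--             index2 = api_path.index("}", index1)
--         except ValueError:
--             return ret
--
--         ret.append(api_path[index1 + 1:index2])
-- ===== SOURCE B (Python) =====
-- def _get_path_variables_names(api_path):
--     # Single left-to-right pass over the characters with an outside/inside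
--     # state, instead of repeated index() scans from moving offsets.
--     ret = []
--     buf = None  # None = outside braces; list of chars = inside a variable name
--     for ch in api_path:
--         if buf is None:
--             if ch == "{":
--                 buf = []
--         elif ch == "}":
--             ret.append("".join(buf))
--             buf = None
--         else:
--             buf.append(ch)
--     return ret
-- ===== Notes on version B (the rewrite author's own statement) =====
-- stated objective: alternative
-- what changed: Replaced the repeated str.index scans from moving offsets (with try/except control flow) by a single character-by-character pass driven by an outside/inside-braces state machine that accumulates the current name.
import Mathlib
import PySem

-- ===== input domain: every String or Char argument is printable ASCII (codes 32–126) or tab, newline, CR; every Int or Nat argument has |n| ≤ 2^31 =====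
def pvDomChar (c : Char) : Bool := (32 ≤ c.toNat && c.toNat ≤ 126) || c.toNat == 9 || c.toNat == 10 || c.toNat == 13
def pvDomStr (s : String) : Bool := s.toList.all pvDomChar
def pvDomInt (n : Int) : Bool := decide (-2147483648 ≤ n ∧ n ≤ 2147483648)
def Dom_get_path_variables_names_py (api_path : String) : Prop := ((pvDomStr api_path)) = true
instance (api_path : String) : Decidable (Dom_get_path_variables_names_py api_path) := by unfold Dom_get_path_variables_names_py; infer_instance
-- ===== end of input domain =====

-- B replaces A's repeated str.index scans (with try/except as the stop condition) by a single
-- character-by-character pass with an outside/inside-braces state machine (alternative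
-- decomposition; same return value, no speed claim).

-- ===== PORT A =====
-- Helper lemmas needed by port A's termination proof (cited in decreasing_by).

-- s.index(sub, start) with start past the end finds nothing.
lemma pv_findFrom_oob (s sub : List Char) (k : Nat) (h : s.length < k) :
    PySem.Chars.findFrom s sub (k : Int) none = -1 := by
  simp only [PySem.Chars.findFrom]
  split_ifs with h1 h2 h3 <;> first | rfl | omega

-- A successful find of "{" from k: the absolute position m1, its bounds, the character
-- standing there, and minimality.
lemma pv_open (s : List Char) (k : Nat)
    (h1 : PySem.Chars.findFrom s ['{'] (k : Int) none ≠ -1) :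
    ∃ m1 : Nat, PySem.Chars.findFrom s ['{'] (k : Int) none = (m1 : Int) ∧
      k ≤ m1 ∧ m1 < s.length ∧ s.drop m1 = '{' :: s.drop (m1 + 1) ∧
      (∀ i, k ≤ i → i < m1 → ¬ ['{'] <+: s.drop i) := by
  by_cases hk : k ≤ s.length
  · obtain ⟨hle, hpre, hmin⟩ := PySem.Chars.findFrom_natCast_spec s ['{'] k hk h1
    set i1 := PySem.Chars.findFrom s ['{'] (k : Int) none with hi1
    have h0 : (0 : Int) ≤ i1 := le_trans (by positivity) hle
    obtain ⟨t, ht⟩ := hpre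
    have hlen : i1.toNat < s.length := by
      by_contra hc
      rw [List.drop_eq_nil_iff.mpr (by omega)] at ht
      simp at ht
    refine ⟨i1.toNat, (Int.toNat_of_nonneg h0).symm, by omega, hlen, ?_, hmin⟩
    have : s.drop (i1.toNat + 1) = t := by
      rw [← List.tail_drop, ← ht]; rfl
    rw [this, ← ht]; rfl
  · exact absurd (pv_findFrom_oob s _ k (by omega)) h1

-- Same for the subsequent find of "}" from m1.
lemma pv_close (s : List Char) (m1 : Nat) (hm1 : m1 ≤ s.length)
    (h2 : PySem.Chars.findFrom s ['}'] (m1 : Int) none ≠ -1) :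
    ∃ m2 : Nat, PySem.Chars.findFrom s ['}'] (m1 : Int) none = (m2 : Int) ∧
      m1 ≤ m2 ∧ m2 < s.length ∧ s.drop m2 = '}' :: s.drop (m2 + 1) ∧
      (∀ i, m1 ≤ i → i < m2 → ¬ ['}'] <+: s.drop i) := by
  obtain ⟨hle, hpre, hmin⟩ := PySem.Chars.findFrom_natCast_spec s ['}'] m1 hm1 h2
  set i2 := PySem.Chars.findFrom s ['}'] (m1 : Int) none with hi2
  have h0 : (0 : Int) ≤ i2 := le_trans (by positivity) hle
  obtain ⟨t, ht⟩ := hpre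
  have hlen : i2.toNat < s.length := by
    by_contra hc
    rw [List.drop_eq_nil_iff.mpr (by omega)] at ht
    simp at ht
  refine ⟨i2.toNat, (Int.toNat_of_nonneg h0).symm, by omega, hlen, ?_, hmin⟩
  have : s.drop (i2.toNat + 1) = t := by
    rw [← List.tail_drop, ← ht]; rfl
  rw [this, ← ht]; rfl

-- The loop's index2 strictly increases (the "}" sits strictly past the previous start).
lemma pv_decrease (s : List Char) (k : Nat)
    (h1 : PySem.Chars.findFrom s ['{'] (k : Int) none ≠ -1)
    (h2 : PySem.Chars.findFrom s ['}'] (PySem.Chars.findFrom s ['{'] (k : Int) none) none ≠ -1) :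
    s.length - (PySem.Chars.findFrom s ['}'] (PySem.Chars.findFrom s ['{'] (k : Int) none) none).toNat
      < s.length - k := by
  obtain ⟨m1, e1, hk1, hlt1, hdrop1, -⟩ := pv_open s k h1
  rw [e1] at h2 ⊢
  obtain ⟨m2, e2, hle, hlt2, hdrop2, -⟩ := pv_close s m1 (le_of_lt hlt1) h2
  rw [e2]
  have hne : m1 ≠ m2 := by
    intro he
    rw [he, hdrop2] at hdrop1
    simp at hdrop1
  simp only [Int.toNat_natCast]
  omega

-- The while-loop of A: index2 is the running start offset, ret the accumulator;
-- str.index(sub, start) is PySem.Chars.findFrom (-1 = the caught ValueError).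
def get_path_variables_names_go (s : List Char) (index2 : Nat) (ret : List String) : List String :=
  let i1 := PySem.Chars.findFrom s ['{'] (index2 : Int) none
  if h1 : i1 = -1 then ret
  else
    let i2 := PySem.Chars.findFrom s ['}'] i1 none
    if h2 : i2 = -1 then ret
    else
      get_path_variables_names_go s i2.toNat
        (ret ++ [String.ofList (PySem.Chars.slice s (some (i1 + 1)) (some i2))])
termination_by s.length - index2
decreasing_by exact pv_decrease s index2 h1 h2

def get_path_variables_names_py (api_path : String) : List String :=
  get_path_variables_names_go api_path.toList 0 []

-- ===== PORT B =====
-- The for-loop of B: the state is the optional in-progress name buffer (None = outside braces).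
def get_path_variables_names_bLoop : List Char → Option (List Char) → List String → List String
  | [], _, ret => ret
  | c :: rest, none, ret =>
      if c = '{' then get_path_variables_names_bLoop rest (some []) ret
      else get_path_variables_names_bLoop rest none ret
  | c :: rest, some buf, ret =>
      if c = '}' then get_path_variables_names_bLoop rest none (ret ++ [String.ofList buf])
      else get_path_variables_names_bLoop rest (some (buf ++ [c])) ret

def get_path_variables_names_py_alt (api_path : String) : List String :=
  get_path_variables_names_bLoop api_path.toList none []

-- ===== PRECONDITION & SPEC =====
def Spec_get_path_variables_names_py (api_path : String) (out : List String) : Prop := out = get_path_variables_names_py_alt api_path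
instance (api_path : String) (out : List String) : Decidable (Spec_get_path_variables_names_py api_path out) := by unfold Spec_get_path_variables_names_py; infer_instance

-- ===== CLAIM (what is proved, stated in full; the proofs are below) =====
def Claim_equal_get_path_variables_names_py : Prop := ∀ (api_path : String), Dom_get_path_variables_names_py api_path → Spec_get_path_variables_names_py api_path (get_path_variables_names_py api_path)

-- ===== LEMMAS AND PROOFS =====

lemma pv_bLoop_none_no_open (cs : List Char) (ret : List String) (h : '{' ∉ cs) :
    get_path_variables_names_bLoop cs none ret = ret := by
  induction cs with
  | nil => rfl
  | cons c rest ih =>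
    simp only [List.mem_cons, not_or] at h
    rw [get_path_variables_names_bLoop, if_neg (Ne.symm h.1)]
    exact ih h.2

lemma pv_bLoop_some_no_close (cs : List Char) : ∀ (buf : List Char) (ret : List String),
    '}' ∉ cs → get_path_variables_names_bLoop cs (some buf) ret = ret := by
  induction cs with
  | nil => intro _ _ _; rfl
  | cons c rest ih =>
    intro buf ret h
    simp only [List.mem_cons, not_or] at h
    rw [get_path_variables_names_bLoop, if_neg (Ne.symm h.1)]
    exact ih _ _ h.2

lemma pv_bLoop_none_skip (cs : List Char) : ∀ (j : Nat) (ret : List String),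
    (∀ i, (hi : i < cs.length) → i < j → cs[i] ≠ '{') →
    get_path_variables_names_bLoop cs none ret
      = get_path_variables_names_bLoop (cs.drop j) none ret := by
  induction cs with
  | nil => intro j ret _; simp
  | cons c rest ih =>
    intro j ret h
    match j with
    | 0 => rfl
    | j + 1 =>
      have hc : c ≠ '{' := h 0 (by simp) (by omega)
      rw [get_path_variables_names_bLoop, if_neg hc, List.drop_succ_cons]
      exact ih j ret (fun i hi hij => h (i + 1) (by simpa) (by omega))

lemma pv_bLoop_some_skip (cs : List Char) : ∀ (j : Nat) (buf : List Char) (ret : List String),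
    (∀ i, (hi : i < cs.length) → i < j → cs[i] ≠ '}') →
    get_path_variables_names_bLoop cs (some buf) ret
      = get_path_variables_names_bLoop (cs.drop j) (some (buf ++ cs.take j)) ret := by
  induction cs with
  | nil => intro j buf ret _; simp
  | cons c rest ih =>
    intro j buf ret h
    match j with
    | 0 => simp
    | j + 1 =>
      have hc : c ≠ '}' := h 0 (by simp) (by omega)
      rw [get_path_variables_names_bLoop, if_neg hc, List.drop_succ_cons, List.take_succ_cons,
        ih j (buf ++ [c]) ret (fun i hi hij => h (i + 1) (by simpa) (by omega))]
      simp

-- A character known (by minimality of the find) not to start a match is not that character.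
lemma pv_not_prefix_ne (s : List Char) (i : Nat) (c : Char) (hi : i < s.length)
    (h : ¬ [c] <+: s.drop i) : s[i] ≠ c := by
  intro he
  refine h ⟨s.drop (i + 1), ?_⟩
  rw [← he]
  exact List.getElem_cons_drop hi

lemma pv_go_eq_bLoop (s : List Char) (k : Nat) (ret : List String) :
    get_path_variables_names_go s k ret = get_path_variables_names_bLoop (s.drop k) none ret := by
  rw [get_path_variables_names_go]
  by_cases h1 : PySem.Chars.findFrom s ['{'] (k : Int) none = -1
  · rw [dif_pos h1]
    by_cases hk : k ≤ s.length
    · have hno : '{' ∉ s.drop k := by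
        intro hm
        exact (PySem.Chars.findFrom_natCast_eq_neg_one_iff s ['{'] k hk).mp h1
          ((List.singleton_infix_iff _ _).mpr hm)
      exact (pv_bLoop_none_no_open _ ret hno).symm
    · rw [List.drop_eq_nil_iff.mpr (by omega)]; rfl
  · rw [dif_neg h1]
    obtain ⟨m1, e1, hk1, hlt1, hdrop1, hmin1⟩ := pv_open s k h1
    -- B's scan in the outside state skips the non-"{" characters up to m1 and consumes the "{".
    have hskip : get_path_variables_names_bLoop (s.drop k) none ret
        = get_path_variables_names_bLoop (s.drop (m1 + 1)) (some []) ret := by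
      have hstep := pv_bLoop_none_skip (s.drop k) (m1 - k) ret (by
        intro i hi hij
        rw [List.getElem_drop]
        exact pv_not_prefix_ne s (k + i) '{' (by simp at hi; omega)
          (hmin1 (k + i) (by omega) (by omega)))
      rw [List.drop_drop] at hstep
      have hm : k + (m1 - k) = m1 := by omega
      rw [hstep, hm, hdrop1, get_path_variables_names_bLoop, if_pos rfl]
    rw [e1]
    by_cases h2 : PySem.Chars.findFrom s ['}'] (m1 : Int) none = -1
    · rw [dif_pos h2]
      have hno : '}' ∉ s.drop (m1 + 1) := by
        intro hm
        exact (PySem.Chars.findFrom_natCast_eq_neg_one_iff s ['}'] m1 (le_of_lt hlt1)).mp h2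
          ((List.singleton_infix_iff _ _).mpr (by rw [hdrop1]; exact List.mem_cons_of_mem _ hm))
      rw [hskip, pv_bLoop_some_no_close _ [] ret hno]
    · rw [dif_neg h2]
      obtain ⟨m2, e2, hle2, hlt2, hdrop2, hmin2⟩ := pv_close s m1 (le_of_lt hlt1) h2
      have hlt12 : m1 < m2 := by
        rcases Nat.lt_or_ge m1 m2 with h | h
        · exact h
        · have he : m1 = m2 := by omega
          rw [he, hdrop2] at hdrop1
          simp at hdrop1
      rw [e2]
      have hrec := pv_go_eq_bLoop s ((m2 : Int).toNat)
        (ret ++ [String.ofList (PySem.Chars.slice s (some ((m1 : Int) + 1)) (some (m2 : Int)))])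
      simp only [Int.toNat_natCast] at hrec
      rw [Int.toNat_natCast, hrec]
      -- the slice A appends is exactly the buffer B accumulates between the braces
      have hsl : PySem.Chars.slice s (some ((m1 : Int) + 1)) (some (m2 : Int))
          = (s.drop (m1 + 1)).take (m2 - (m1 + 1)) := by
        have hcast : ((m1 : Int) + 1) = ((m1 + 1 : Nat) : Int) := by push_cast; ring
        rw [hcast, PySem.Chars.slice_eq_listSlice, PySem.List.slice_natCast]
      -- B's scan in the inside state accumulates up to m2 and closes at the "}".
      have hskip2 := pv_bLoop_some_skip (s.drop (m1 + 1)) (m2 - (m1 + 1)) [] ret (by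
        intro i hi hij
        rw [List.getElem_drop]
        exact pv_not_prefix_ne s (m1 + 1 + i) '}' (by simp at hi; omega)
          (hmin2 (m1 + 1 + i) (by omega) (by omega)))
      rw [List.drop_drop] at hskip2
      have hm2 : m1 + 1 + (m2 - (m1 + 1)) = m2 := by omega
      rw [hm2, hdrop2] at hskip2
      rw [hskip, hskip2, get_path_variables_names_bLoop, if_pos rfl, hsl]
      simp only [List.nil_append]
      rw [hdrop2, get_path_variables_names_bLoop, if_neg (by decide)]
termination_by s.length - k
decreasing_by
  have := pv_decrease s k h1 (by rw [e1]; exact h2)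
  rw [e1, e2, Int.toNat_natCast] at this
  exact this

-- ===== VERDICT (by name: the statement is the Claim_ definition above) =====
theorem get_path_variables_names_py_spec : Claim_equal_get_path_variables_names_py := by
  intro api_path _
  unfold Spec_get_path_variables_names_py get_path_variables_names_py get_path_variables_names_py_alt
  simpa using pv_go_eq_bLoop api_path.toList 0 []
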